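-- pv_equiv track=rewrite | github.com/s2018952/Advent-of-Code | 2023/14-12-2023/solution1.py | getLoadForWestTilt
-- ===== SOURCE A (Python) =====
-- def getLoadForWestTilt(row):
--     load = 0
--     roundRockCount = 0
--     nextLoadToAdd = len(row)
--     for i in range(len(row)):
--         if row[i] == '#':
--             for j in range(roundRockCount):
--                 load += nextLoadToAdd
--                 nextLoadToAdd -= 1
--             roundRockCount = 0
--             nextLoadToAdd = len(row) - i - 1
--         elif row[i] == 'O':
--             roundRockCount += 1
--     if roundRockCount > 0:
--         for j in range(roundRockCount):
--             load += nextLoadToAdd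
--             nextLoadToAdd -= 1
--     return load
-- ===== SOURCE B (Python) =====
-- def getLoadForWestTilt(row):
--     # Single pass: keep the index of the next free slot; each round rock
--     # contributes len(row) - free directly. O(n) instead of A's nested loops.
--     n = len(row)
--     load = 0
--     free = 0
--     for i, ch in enumerate(row):
--         if ch == '#':
--             free = i + 1
--         elif ch == 'O':
--             load += n - free
--             free += 1
--     return load
-- ===== Notes on version B (the rewrite author's own statement) =====
-- stated objective: faster
-- what changed: Replaces A's deferred per-rock inner accumulation loops (run at each '#' and at the end) with a single pass that tracks the next free slot index and adds each rock's load immediately, O(n) with no inner loop.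
import Mathlib
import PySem

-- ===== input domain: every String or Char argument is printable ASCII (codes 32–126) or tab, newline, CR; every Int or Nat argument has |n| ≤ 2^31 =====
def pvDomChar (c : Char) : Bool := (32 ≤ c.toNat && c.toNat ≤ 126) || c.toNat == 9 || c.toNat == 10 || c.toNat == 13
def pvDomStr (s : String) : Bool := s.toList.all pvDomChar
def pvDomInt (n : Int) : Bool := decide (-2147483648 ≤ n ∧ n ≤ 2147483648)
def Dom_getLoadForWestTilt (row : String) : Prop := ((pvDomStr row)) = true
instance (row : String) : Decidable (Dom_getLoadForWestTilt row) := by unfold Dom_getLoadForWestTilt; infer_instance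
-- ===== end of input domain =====

-- B replaces A's nested per-rock accumulation loops by a single pass tracking the next free slot (objective: faster).

-- ===== PORT A =====
-- inner loop 'for j in range(roundRockCount): load += nextLoadToAdd; nextLoadToAdd -= 1'
def pvInner (load next : Int) : Nat → Int × Int
  | 0 => (load, next)
  | k+1 => pvInner (load + next) (next - 1) k

-- body of A's outer 'for i in range(len(row))' loop; state = (load, roundRockCount, nextLoadToAdd)
def pvStepA (n : Int) (s : Int × Nat × Int) (p : Char × Nat) : Int × Nat × Int :=
  if p.1 = '#' then
    let r := pvInner s.1 s.2.2 s.2.1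
    (r.1, 0, n - (p.2 : Int) - 1)
  else if p.1 = 'O' then (s.1, s.2.1 + 1, s.2.2)
  else s

def getLoadForWestTilt (row : String) : Int :=
  let n : Int := row.toList.length
  let st := (row.toList.zipIdx).foldl (pvStepA n) (0, 0, n)
  if st.2.1 > 0 then (pvInner st.1 st.2.2 st.2.1).1 else st.1

-- ===== PORT B =====
-- body of B's single 'for i, ch in enumerate(row)' loop; state = (load, free)
def pvStepB (n : Int) (s : Int × Int) (p : Char × Nat) : Int × Int :=
  if p.1 = '#' then (s.1, (p.2 : Int) + 1)
  else if p.1 = 'O' then (s.1 + n - s.2, s.2 + 1)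
  else s

def getLoadForWestTilt_alt (row : String) : Int :=
  let n : Int := row.toList.length
  ((row.toList.zipIdx).foldl (pvStepB n) (0, 0)).1

-- ===== PRECONDITION & SPEC =====
def Spec_getLoadForWestTilt (row : String) (out : Int) : Prop := out = getLoadForWestTilt_alt row
instance (row : String) (out : Int) : Decidable (Spec_getLoadForWestTilt row out) := by unfold Spec_getLoadForWestTilt; infer_instance

-- ===== CLAIM (what is proved, stated in full; the proofs are below) =====
def Claim_equal_getLoadForWestTilt : Prop := ∀ (row : String), Dom_getLoadForWestTilt row → Spec_getLoadForWestTilt row (getLoadForWestTilt row)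

-- ===== LEMMAS AND PROOFS =====

theorem pvInner_succ_fst (k : Nat) : ∀ (l x : Int),
    (pvInner l x (k+1)).1 = (pvInner l x k).1 + (x - k) := by
  induction k with
  | zero => intro l x; simp [pvInner]
  | succ k ih =>
    intro l x
    show (pvInner (l+x) (x-1) (k+1)).1 = (pvInner (l+x) (x-1) k).1 + (x - (k+1))
    rw [ih]; ring

-- Invariant carried through the fold: B's load equals A's load after flushing the
-- pending rocks, and B's free-slot value satisfies n - free = next - cnt.
theorem pv_main (n : Int) (cs : List Char) : ∀ (i : Nat) (loadA : Int) (cnt : Nat) (next : Int) (sB : Int × Int),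
    sB.1 = (pvInner loadA next cnt).1 → n - sB.2 = next - cnt →
    (((cs.zipIdx i).foldl (pvStepB n) sB).1 =
      (pvInner ((cs.zipIdx i).foldl (pvStepA n) (loadA, cnt, next)).1
        ((cs.zipIdx i).foldl (pvStepA n) (loadA, cnt, next)).2.2
        ((cs.zipIdx i).foldl (pvStepA n) (loadA, cnt, next)).2.1).1) := by
  induction cs with
  | nil => intro i loadA cnt next sB h1 h2; simpa using h1
  | cons c cs ih =>
    intro i loadA cnt next sB h1 h2
    rw [List.zipIdx_cons, List.foldl_cons, List.foldl_cons]
    by_cases hc : c = '#'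
    · rw [show pvStepA n (loadA, cnt, next) (c, i) = ((pvInner loadA next cnt).1, 0, n - (i:Int) - 1) from by
          simp [pvStepA, hc],
        show pvStepB n sB (c, i) = (sB.1, (i:Int) + 1) from by simp [pvStepB, hc]]
      exact ih (i+1) _ 0 (n - (i:Int) - 1) (sB.1, (i:Int)+1) (by simpa [pvInner] using h1) (by push_cast; ring)
    · by_cases ho : c = 'O'
      · rw [show pvStepA n (loadA, cnt, next) (c, i) = (loadA, cnt + 1, next) from by
            simp [pvStepA, ho],
          show pvStepB n sB (c, i) = (sB.1 + n - sB.2, sB.2 + 1) from by simp [pvStepB, ho]]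
        refine ih (i+1) loadA (cnt+1) next (sB.1 + n - sB.2, sB.2 + 1) ?_ ?_
        · rw [pvInner_succ_fst, ← h1]; omega
        · push_cast; omega
      · rw [show pvStepA n (loadA, cnt, next) (c, i) = (loadA, cnt, next) from by
            simp [pvStepA, hc, ho],
          show pvStepB n sB (c, i) = sB from by simp [pvStepB, hc, ho]]
        exact ih (i+1) loadA cnt next sB h1 h2

-- ===== VERDICT (by name: the statement is the Claim_ definition above) =====
theorem getLoadForWestTilt_spec : Claim_equal_getLoadForWestTilt := by
  intro row _
  show getLoadForWestTilt row = getLoadForWestTilt_alt row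
  have h := pv_main (row.toList.length : Int) row.toList 0 0 0 (row.toList.length : Int) (0,0)
    (by simp [pvInner]) (by simp)
  show (if ((row.toList.zipIdx).foldl (pvStepA (row.toList.length : Int)) (0, 0, (row.toList.length : Int))).2.1 > 0
      then (pvInner _ _ _).1 else _) = _
  split
  · exact h.symm
  · next hgt =>
    have h0 : ((row.toList.zipIdx).foldl (pvStepA (row.toList.length : Int)) (0, 0, (row.toList.length : Int))).2.1 = 0 := by omega
    rw [h0] at h
    simp only [pvInner] at h
    exact h.symm
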